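-- pv_equiv track=rewrite | github.com/rezaarezvan/AoC-2023 | day11/day11.py | map_universe
-- ===== SOURCE A (Python) =====
-- def map_universe(grid):
--     empty_row = set()
--     empty_col = set()
--     stars = set()
--     for i, j in enumerate(grid):
--         if len(set(j)) == 1:
--             empty_row.add(i)
--         for k, l in enumerate(grid[i]):
--             if l == '#':
--                 stars.add((i, k))
--     for k in range(len(grid[0])):
--         if len(set([j[k] for j in grid])) == 1:
--             empty_col.add(k)
--     return empty_row, empty_col, stars
-- ===== SOURCE B (Python) =====
-- def map_universe(grid):
--     width = len(grid[0])
--     cols = [set() for _ in range(width)]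
--     empty_row = set()
--     stars = set()
--     for i, row in enumerate(grid):
--         if len(set(row)) == 1:
--             empty_row.add(i)
--         stars.update((i, k) for k, ch in enumerate(row) if ch == '#')
--         cols = [s | {row[k]} for k, s in enumerate(cols)]
--     empty_col = {k for k, s in enumerate(cols) if len(s) == 1}
--     return empty_row, empty_col, stars
-- ===== Notes on version B (the rewrite author's own statement) =====
-- stated objective: alternative
-- what changed: B builds per-column character sets incrementally in the single pass over the rows and derives empty_col by one summary pass over that index, instead of A's separate per-column rescan of the whole grid.
import Mathlib
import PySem

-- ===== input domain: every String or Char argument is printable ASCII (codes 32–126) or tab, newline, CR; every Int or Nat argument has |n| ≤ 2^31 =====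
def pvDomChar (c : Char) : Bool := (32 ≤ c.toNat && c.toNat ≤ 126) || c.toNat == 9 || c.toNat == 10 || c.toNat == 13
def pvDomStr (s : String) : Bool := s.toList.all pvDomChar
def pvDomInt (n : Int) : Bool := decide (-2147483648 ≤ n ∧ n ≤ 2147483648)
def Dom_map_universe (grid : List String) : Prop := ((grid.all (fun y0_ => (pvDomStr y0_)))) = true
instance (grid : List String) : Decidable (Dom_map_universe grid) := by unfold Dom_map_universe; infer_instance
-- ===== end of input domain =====

-- B replaces A's separate per-column rescans of the grid by per-column character sets
-- built incrementally during the single pass over the rows (alternative decomposition, same cost).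

-- ===== PORT A =====
def map_universe (grid : List String) : List Int × List Int × (List (Int × Int)) :=
  let rowStep := fun (st : PySem.Set Int × PySem.Set (Int × Int)) (p : Int × String) =>
    let er := if (PySem.Set.ofList p.2.toList).length = 1 then PySem.Set.add st.1 p.1 else st.1
    -- grid[i]: i comes from enumerate, so it is in range; the default "" is unreachable
    let stars := (PySem.List.enumerate ((PySem.List.pyGet? grid p.1).getD "").toList).foldl
      (fun s q => if q.2 = '#' then PySem.Set.add s (p.1, q.1) else s) st.2
    (er, stars)
  let res := (PySem.List.enumerate grid).foldl rowStep ([], [])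
  -- len(grid[0]): Pre_ guarantees grid ≠ []; the default "" is unreachable
  let width : Int := (((PySem.List.pyGet? grid 0).getD "").toList.length : Int)
  let empty_col := (PySem.List.pyRange 0 width 1).foldl
    (fun ec k =>
      -- j[k]: Pre_ guarantees every row has at least `width` characters; the default ' ' is unreachable
      if (PySem.Set.ofList (grid.map (fun j => (PySem.List.pyGet? j.toList k).getD ' '))).length = 1
      then PySem.Set.add ec k else ec) []
  (res.1, empty_col, res.2)

-- ===== PORT B =====
def map_universe_alt (grid : List String) : List Int × List Int × (List (Int × Int)) :=
  -- len(grid[0]): Pre_ guarantees grid ≠ []; the default "" is unreachable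
  let width : Int := (((PySem.List.pyGet? grid 0).getD "").toList.length : Int)
  let cols0 : List (PySem.Set Char) := (PySem.List.pyRange 0 width 1).map (fun _ => PySem.Set.empty)
  let rowStep := fun (st : PySem.Set Int × PySem.Set (Int × Int) × List (PySem.Set Char)) (p : Int × String) =>
    let er := if (PySem.Set.ofList p.2.toList).length = 1 then PySem.Set.add st.1 p.1 else st.1
    let stars := (PySem.List.enumerate p.2.toList).foldl
      (fun s q => if q.2 = '#' then PySem.Set.add s (p.1, q.1) else s) st.2.1
    -- row[k]: Pre_ guarantees every row has at least `width` characters; the default ' ' is unreachable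
    let cols := (PySem.List.enumerate st.2.2).map
      (fun q => PySem.Set.union q.2 (PySem.Set.ofList [(PySem.List.pyGet? p.2.toList q.1).getD ' ']))
    (er, stars, cols)
  let res := (PySem.List.enumerate grid).foldl rowStep ([], [], cols0)
  let empty_col := (PySem.List.enumerate res.2.2).foldl
    (fun ec q => if q.2.length = 1 then PySem.Set.add ec q.1 else ec) []
  (res.1, empty_col, res.2.1)

-- ===== PRECONDITION & SPEC =====
-- Pre_ excludes exactly the inputs on which the Python A raises IndexError: the empty grid
-- (grid[0]) and grids with a row shorter than the first row (j[k] in the column scan).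
def Pre_map_universe (grid : List String) : Prop :=
  grid ≠ [] ∧ ∀ j ∈ grid, (grid.headD "").toList.length ≤ j.toList.length
instance (grid : List String) : Decidable (Pre_map_universe grid) := by
  unfold Pre_map_universe; infer_instance
def pvWitness_map_universe : List String := ["#.", ".#", ".."]
def Spec_map_universe (grid : List String) (out : List Int × List Int × (List (Int × Int))) : Prop := out = map_universe_alt grid
instance (grid : List String) (out : List Int × List Int × (List (Int × Int))) : Decidable (Spec_map_universe grid out) := by unfold Spec_map_universe; infer_instance

-- ===== CLAIM (what is proved, stated in full; the proofs are below) =====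
def Claim_equal_map_universe : Prop := ∀ (grid : List String), Dom_map_universe grid → Pre_map_universe grid → Spec_map_universe grid (map_universe grid)

-- ===== LEMMAS AND PROOFS =====

-- proof-only names for the inline pieces of the two ports
def chAt (row : String) (k : Int) : Char := (PySem.List.pyGet? row.toList k).getD ' '

def widthOf (grid : List String) : Int := (((PySem.List.pyGet? grid 0).getD "").toList.length : Int)

def colList (grid : List String) (k : Int) : PySem.Set Char :=
  PySem.Set.ofList (grid.map (fun j => chAt j k))

def stepA (grid : List String) (st : PySem.Set Int × PySem.Set (Int × Int)) (p : Int × String) :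
    PySem.Set Int × PySem.Set (Int × Int) :=
  let er := if (PySem.Set.ofList p.2.toList).length = 1 then PySem.Set.add st.1 p.1 else st.1
  let stars := (PySem.List.enumerate ((PySem.List.pyGet? grid p.1).getD "").toList).foldl
    (fun s q => if q.2 = '#' then PySem.Set.add s (p.1, q.1) else s) st.2
  (er, stars)

def stepRow (st : PySem.Set Int × PySem.Set (Int × Int)) (p : Int × String) :
    PySem.Set Int × PySem.Set (Int × Int) :=
  let er := if (PySem.Set.ofList p.2.toList).length = 1 then PySem.Set.add st.1 p.1 else st.1
  let stars := (PySem.List.enumerate p.2.toList).foldl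
    (fun s q => if q.2 = '#' then PySem.Set.add s (p.1, q.1) else s) st.2
  (er, stars)

def colStep (cols : List (PySem.Set Char)) (p : Int × String) : List (PySem.Set Char) :=
  (PySem.List.enumerate cols).map
    (fun q => PySem.Set.union q.2 (PySem.Set.ofList [(PySem.List.pyGet? p.2.toList q.1).getD ' ']))

def stepB (st : PySem.Set Int × PySem.Set (Int × Int) × List (PySem.Set Char)) (p : Int × String) :
    PySem.Set Int × PySem.Set (Int × Int) × List (PySem.Set Char) :=
  let er := if (PySem.Set.ofList p.2.toList).length = 1 then PySem.Set.add st.1 p.1 else st.1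
  let stars := (PySem.List.enumerate p.2.toList).foldl
    (fun s q => if q.2 = '#' then PySem.Set.add s (p.1, q.1) else s) st.2.1
  (er, stars, colStep st.2.2 p)

def cols0 (grid : List String) : List (PySem.Set Char) :=
  (PySem.List.pyRange 0 (widthOf grid) 1).map (fun _ => PySem.Set.empty)

-- s | {c} is s.add(c)
theorem set_union_singleton {α : Type} [DecidableEq α] (s : PySem.Set α) (c : α) :
    PySem.Set.union s (PySem.Set.ofList [c]) = PySem.Set.add s c := by
  simp [PySem.Set.union, PySem.Set.update, PySem.Set.ofList]

-- inside the row loop, grid[i] is the current row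
theorem stepA_eq_stepRow (grid : List String) (st : PySem.Set Int × PySem.Set (Int × Int))
    (p : Int × String) (hp : p ∈ PySem.List.enumerate grid) :
    stepA grid st p = stepRow st p := by
  obtain ⟨k, hk, rfl⟩ := (PySem.List.mem_enumerate_iff grid 0 p).1 hp
  simp [stepA, stepRow, PySem.List.pyGet?_natCast, List.getElem?_eq_getElem hk]

-- B's fold splits: the (empty_row, stars) part evolves exactly as A's row loop (with
-- grid[i] replaced by the row), and the column sets evolve independently by colStep
theorem foldB_split (l : List (Int × String)) (er : PySem.Set Int)
    (st : PySem.Set (Int × Int)) (cols : List (PySem.Set Char)) :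
    l.foldl stepB (er, st, cols) =
      ((l.foldl stepRow (er, st)).1, (l.foldl stepRow (er, st)).2, l.foldl colStep cols) := by
  induction l generalizing er st cols with
  | nil => rfl
  | cons p l ih =>
    simp only [List.foldl_cons]
    have hstep : stepB (er, st, cols) p =
        ((stepRow (er, st) p).1, (stepRow (er, st) p).2, colStep cols p) := rfl
    rw [hstep, ih]

theorem colStep_getElem? (cols : List (PySem.Set Char)) (p : Int × String) (k : Nat) :
    (colStep cols p)[k]? = cols[k]?.map (fun s => PySem.Set.add s (chAt p.2 (k : Int))) := by
  simp [colStep, PySem.List.getElem?_enumerate, Option.map_map, Function.comp_def,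
    set_union_singleton, chAt]

theorem length_colStep (cols : List (PySem.Set Char)) (p : Int × String) :
    (colStep cols p).length = cols.length := by
  simp [colStep]

theorem foldl_colStep_getElem? (l : List (Int × String)) (cols : List (PySem.Set Char)) (k : Nat) :
    (l.foldl colStep cols)[k]? =
      cols[k]?.map (fun s => l.foldl (fun t p => PySem.Set.add t (chAt p.2 (k : Int))) s) := by
  induction l generalizing cols with
  | nil => simp
  | cons p l ih =>
    simp only [List.foldl_cons, ih, colStep_getElem?, Option.map_map, Function.comp_def]

theorem length_foldl_colStep (l : List (Int × String)) (cols : List (PySem.Set Char)) :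
    (l.foldl colStep cols).length = cols.length := by
  induction l generalizing cols with
  | nil => rfl
  | cons p l ih => simp only [List.foldl_cons, ih, length_colStep]

-- folding a function of the row over enumerate is folding over the rows
theorem foldl_enumerate_snd {α : Type} (xs : List String) (s : Int) (g : α → String → α) (init : α) :
    (PySem.List.enumerate xs s).foldl (fun t p => g t p.2) init = xs.foldl g init := by
  induction xs generalizing s init with
  | nil => rfl
  | cons x xs ih => simp only [PySem.List.enumerate_cons, List.foldl_cons, ih]

-- accumulating the k-th character of every row builds exactly set of the k-th column
theorem fold_add_col (grid : List String) (j : Int) :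
    (PySem.List.enumerate grid).foldl (fun t p => PySem.Set.add t (chAt p.2 j))
      PySem.Set.empty = colList grid j := by
  rw [colList, PySem.Set.ofList_eq_foldl, List.foldl_map,
    foldl_enumerate_snd grid 0 (fun t x => PySem.Set.add t (chAt x j))]
  rfl

-- the two empty_col computations agree
theorem ec_eq (grid : List String) :
    (PySem.List.pyRange 0 (widthOf grid) 1).foldl
      (fun ec k => if (colList grid k).length = 1 then PySem.Set.add ec k else ec) [] =
    (PySem.List.enumerate ((PySem.List.enumerate grid).foldl colStep (cols0 grid))).foldl
      (fun ec q => if q.2.length = 1 then PySem.Set.add ec q.1 else ec) [] := by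
  set colsF := (PySem.List.enumerate grid).foldl colStep (cols0 grid) with hcolsF
  have hw : widthOf grid = (((PySem.List.pyGet? grid 0).getD "").toList.length : Int) := rfl
  have hlen : colsF.length = ((PySem.List.pyGet? grid 0).getD "").toList.length := by
    rw [hcolsF, length_foldl_colStep]
    simp [cols0, PySem.List.length_pyRange_one, hw]
  have hget : ∀ (k : Nat), k < colsF.length →
      colsF[k]? = some (colList grid (k : Int)) := by
    intro k hk
    rw [hcolsF, foldl_colStep_getElem?]
    have hk0 : (cols0 grid)[k]? = some PySem.Set.empty := by
      have : k < (cols0 grid).length := by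
        rw [hcolsF, length_foldl_colStep] at hk; exact hk
      simp only [cols0, List.getElem?_map]
      rw [List.getElem?_eq_getElem (by simpa [cols0] using this)]
      simp
    rw [hk0, Option.map_some, fold_add_col]
  rw [PySem.List.enumerate_eq_map_pyRange (d := PySem.Set.empty), List.foldl_map]
  have hlen' : PySem.List.len colsF = widthOf grid := by
    simp [PySem.List.len, hlen, hw]
  rw [hlen']
  apply PySem.List.foldl_congr_mem
  intro acc k hkmem
  obtain ⟨hk0, hkw⟩ := (PySem.List.mem_pyRange_one).1 hkmem
  have hklt : k.toNat < colsF.length := by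
    rw [hlen]; rw [hw] at hkw; omega
  have hkeq : k = ((k.toNat : Nat) : Int) := (Int.toNat_of_nonneg hk0).symm
  have hgd : PySem.List.pyGetD colsF k PySem.Set.empty = colList grid k := by
    rw [hkeq, PySem.List.pyGetD, PySem.List.pyGet?_natCast, hget k.toNat hklt]
    rfl
  rw [hgd]

-- ===== VERDICT (by name: the statement is the Claim_ definition above) =====
theorem map_universe_spec : Claim_equal_map_universe := by
  intro grid _ _
  unfold Spec_map_universe
  have hA : map_universe grid =
      ( ((PySem.List.enumerate grid).foldl (stepA grid) ([], [])).1,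
        (PySem.List.pyRange 0 (widthOf grid) 1).foldl
          (fun ec k => if (colList grid k).length = 1 then PySem.Set.add ec k else ec) [],
        ((PySem.List.enumerate grid).foldl (stepA grid) ([], [])).2 ) := rfl
  have hB : map_universe_alt grid =
      ( ((PySem.List.enumerate grid).foldl stepB ([], [], cols0 grid)).1,
        (PySem.List.enumerate ((PySem.List.enumerate grid).foldl stepB ([], [], cols0 grid)).2.2).foldl
          (fun ec q => if q.2.length = 1 then PySem.Set.add ec q.1 else ec) [],
        ((PySem.List.enumerate grid).foldl stepB ([], [], cols0 grid)).2.1 ) := rfl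
  have hAB : (PySem.List.enumerate grid).foldl (stepA grid) ([], []) =
      (PySem.List.enumerate grid).foldl stepRow ([], []) := by
    apply PySem.List.foldl_congr_mem
    intro acc p hp
    exact stepA_eq_stepRow grid acc p hp
  rw [hA, hB, foldB_split, hAB, ec_eq]
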